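-- pv_equiv track=rewrite | github.com/selfteaching/selfteaching-python-camp | 19100101/WangRui0802/d5_exercise_string.py | delet_word
-- ===== SOURCE A (Python) =====
-- def delet_word(s,keyword):
--     i=0
--     while i<len(s):
--         if keyword in s[i]:
--             del s[i] #由于删除了一个元素，此时i不能执行i=i+1，s[i]正好是下一个元素，否则index就跳过了一个元素
--         else:
--             i=i+1
--     return s
-- ===== SOURCE B (Python) =====
-- def delet_word(s, keyword):
--     n = len(s)
--     w = 0
--     r = 0
--     while r < n:
--         if keyword not in s[r]:
--             s[w] = s[r]
--             w += 1
--         r += 1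
--     del s[w:]
--     return s
-- ===== Notes on version B (the rewrite author's own statement) =====
-- stated objective: alternative
-- what changed: Replaces the delete-in-place loop with a back-stepping index by a single-pass write-index compaction that copies survivors forward and truncates once.
import Mathlib
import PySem

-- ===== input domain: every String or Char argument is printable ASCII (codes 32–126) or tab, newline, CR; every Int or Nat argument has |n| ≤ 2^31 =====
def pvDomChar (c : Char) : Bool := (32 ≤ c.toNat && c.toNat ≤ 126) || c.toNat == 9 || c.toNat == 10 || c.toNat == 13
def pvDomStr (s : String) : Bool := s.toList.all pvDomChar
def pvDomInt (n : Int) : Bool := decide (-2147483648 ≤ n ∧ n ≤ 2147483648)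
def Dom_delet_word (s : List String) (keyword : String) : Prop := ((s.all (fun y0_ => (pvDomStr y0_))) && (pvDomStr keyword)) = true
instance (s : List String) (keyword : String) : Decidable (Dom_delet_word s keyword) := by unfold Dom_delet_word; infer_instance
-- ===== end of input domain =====

-- B replaces A's delete-one-at-a-time loop by a write-index compaction that
-- copies survivors forward and truncates once. Both Pythons mutate `s` in
-- place and return it; the equivalence proved here is about the return value.

-- ===== PORT A =====
-- while i < len(s): if keyword in s[i]: del s[i] else: i += 1
def deletLoopA (keyword : String) (s : List String) (i : Nat) : List String :=
  if h : i < s.length then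
    if PySem.Str.isIn keyword (s.getD i "") then
      deletLoopA keyword (s.eraseIdx i) i
    else
      deletLoopA keyword s (i + 1)
  else s
termination_by s.length - i
decreasing_by
  · have := @List.length_eraseIdx _ s i
    simp only [if_pos h] at this
    omega
  · omega

def delet_word (s : List String) (keyword : String) : List String :=
  deletLoopA keyword s 0

-- ===== PORT B =====
-- while r < n: if keyword not in s[r]: s[w] = s[r]; w += 1;  r += 1;  del s[w:]
def deletLoopB (keyword : String) (n : Nat) (cur : List String) (w r : Nat) :
    List String × Nat :=
  if r < n then
    if !(PySem.Str.isIn keyword (cur.getD r "")) then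
      deletLoopB keyword n (cur.set w (cur.getD r "")) (w + 1) (r + 1)
    else
      deletLoopB keyword n cur w (r + 1)
  else (cur, w)
termination_by n - r

def delet_word_alt (s : List String) (keyword : String) : List String :=
  let res := deletLoopB keyword s.length s 0 0
  res.1.take res.2

-- ===== PRECONDITION & SPEC =====
def Spec_delet_word (s : List String) (keyword : String) (out : List String) : Prop := out = delet_word_alt s keyword
instance (s : List String) (keyword : String) (out : List String) : Decidable (Spec_delet_word s keyword out) := by unfold Spec_delet_word; infer_instance

-- ===== CLAIM (what is proved, stated in full; the proofs are below) =====
def Claim_equal_delet_word : Prop := ∀ (s : List String) (keyword : String), Dom_delet_word s keyword → Spec_delet_word s keyword (delet_word s keyword)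

-- ===== LEMMAS AND PROOFS =====

-- A's loop keeps the processed prefix and filters the rest.
theorem deletLoopA_eq (keyword : String) :
    ∀ (s : List String) (i : Nat),
      deletLoopA keyword s i =
        s.take i ++ (s.drop i).filter (fun x => !(PySem.Str.isIn keyword x)) := by
  intro s i
  induction s, i using deletLoopA.induct keyword with
  | case1 s i h hin ih =>
    rw [deletLoopA]
    simp only [h, dif_pos, hin, if_pos]
    rw [ih]
    have hget : s.getD i "" = s[i] := by
      rw [List.getD_eq_getElem?_getD, List.getElem?_eq_getElem h]; rfl
    have h1 : (s.eraseIdx i).take i = s.take i := by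
      rw [List.eraseIdx_eq_take_drop_succ,
          List.take_append_of_le_length (by rw [List.length_take]; omega),
          List.take_take]
      simp
    have h2 : (s.eraseIdx i).drop i = s.drop (i + 1) := by
      rw [List.eraseIdx_eq_take_drop_succ,
          List.drop_append_of_le_length (by rw [List.length_take]; omega)]
      have hnil : (s.take i).drop i = [] :=
        List.drop_eq_nil_of_le (by rw [List.length_take]; omega)
      rw [hnil]; rfl
    have hd : s.drop i = s[i] :: s.drop (i + 1) := List.drop_eq_getElem_cons h
    rw [hget] at hin
    have hb : (!PySem.Str.isIn keyword s[i]) = false := by rw [hin]; rfl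
    rw [h1, h2, hd, List.filter_cons, hb]
    simp
  | case2 s i h hin ih =>
    rw [deletLoopA]
    simp only [h, dif_pos, hin]
    rw [ih]
    have hget : s.getD i "" = s[i] := by
      rw [List.getD_eq_getElem?_getD, List.getElem?_eq_getElem h]; rfl
    have hd : s.drop i = s[i] :: s.drop (i + 1) := List.drop_eq_getElem_cons h
    rw [hget] at hin
    have hb : (!PySem.Str.isIn keyword s[i]) = true := by
      rw [Bool.eq_false_iff.mpr hin]; rfl
    rw [hd, List.filter_cons, hb]
    rw [List.take_add_one, List.getElem?_eq_getElem h]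
    simp only [Option.toList_some, List.append_assoc, List.singleton_append,
      Bool.false_eq_true, if_false]
    rw [if_pos trivial]
  | case3 s i h =>
    rw [deletLoopA]
    simp only [h]
    have : s.drop i = [] := List.drop_eq_nil_of_le (by omega)
    simp [this, List.take_of_length_le (by omega : s.length ≤ i)]

-- B's loop invariant: the tail from the read index is still the original list,
-- and the first w slots hold the filtered processed prefix.
theorem deletLoopB_eq (keyword : String) (s0 : List String) :
    ∀ (cur : List String) (w r : Nat),
      w ≤ r → cur.length = s0.length → cur.drop r = s0.drop r →
      cur.take w = (s0.take r).filter (fun x => !(PySem.Str.isIn keyword x)) →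
      (deletLoopB keyword s0.length cur w r).1.take
        (deletLoopB keyword s0.length cur w r).2 =
        s0.filter (fun x => !(PySem.Str.isIn keyword x)) := by
  intro cur w r
  induction cur, w, r using deletLoopB.induct keyword s0.length with
  | case1 cur w r h hin ih =>
    intro hwr hlen hdrop htake
    have hr : r < s0.length := h
    have hrc : r < cur.length := by omega
    have hw : w < cur.length := by omega
    have hq : cur[r]? = s0[r]? := by
      have := congrArg (fun l => l[0]?) hdrop
      simpa [List.getElem?_drop] using this
    have hget : cur.getD r "" = s0[r] := by
      rw [List.getD_eq_getElem?_getD, hq, List.getElem?_eq_getElem hr]; rfl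
    rw [deletLoopB]
    simp only [h, if_pos, hin]
    apply ih
    · omega
    · simp [hlen]
    · rw [List.drop_set, if_pos (by omega)]
      have := congrArg (List.drop 1) hdrop
      simpa [List.drop_drop, Nat.add_comm] using this
    · rw [List.take_set, List.take_add_one, List.getElem?_eq_getElem hw,
          List.set_append, List.take_add_one (l := s0), List.getElem?_eq_getElem hr]
      simp only [List.length_take, Nat.min_def, List.filter_append]
      have hb : (!PySem.Str.isIn keyword s0[r]) = true := by rw [← hget]; exact hin
      rw [htake]
      have hg2 : cur[r]?.getD "" = s0[r] := by rw [hq, List.getElem?_eq_getElem hr]; rfl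
      have hbC : PySem.Chars.isIn keyword.toList s0[r].toList = false := by
        simpa using hb
      simp [Nat.le_of_lt hw, hg2, hbC]
  | case2 cur w r h hin ih =>
    intro hwr hlen hdrop htake
    have hr : r < s0.length := h
    have hrc : r < cur.length := by omega
    have hq : cur[r]? = s0[r]? := by
      have := congrArg (fun l => l[0]?) hdrop
      simpa [List.getElem?_drop] using this
    have hget : cur.getD r "" = s0[r] := by
      rw [List.getD_eq_getElem?_getD, hq, List.getElem?_eq_getElem hr]; rfl
    rw [deletLoopB]
    simp only [h, if_pos, hin]
    apply ih
    · omega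
    · exact hlen
    · have := congrArg (List.drop 1) hdrop
      simpa [List.drop_drop, Nat.add_comm] using this
    · rw [List.take_add_one, List.getElem?_eq_getElem hr, List.filter_append, htake]
      have hb : (!PySem.Str.isIn keyword s0[r]) = false := by
        rw [← hget]; simpa using hin
      have hbC : PySem.Chars.isIn keyword.toList s0[r].toList = true := by
        simpa using hb
      simp [hbC]
  | case3 cur w r h =>
    intro hwr hlen hdrop htake
    rw [deletLoopB, if_neg h]
    rw [htake, List.take_of_length_le (by omega : s0.length ≤ r)]

-- ===== VERDICT (by name: the statement is the Claim_ definition above) =====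
theorem delet_word_spec : Claim_equal_delet_word := by
  intro s keyword _
  unfold Spec_delet_word delet_word delet_word_alt
  rw [deletLoopA_eq keyword s 0]
  rw [deletLoopB_eq keyword s s 0 0 le_rfl rfl rfl (by simp)]
  simp
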